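-- pv_equiv track=rewrite | github.com/myHonorABC/Group-Allocation | group_allocation.py | members_group1
-- ===== SOURCE A (Python) =====
-- import copy
--
-- def members_group1(all_employees, all_groups):
--     '''
--     对6名未分组人员分组
--     分组后的所有分组方式个数为：7^6
--     :param all_employees: 所有未分组人员
--     :param all_groups: 存放所有分组情况
--     :return:
--     '''
--     if not all_employees:
--         return all_groups
--     cur_member = all_employees.pop(0)        # 取出一个待分组人员
--     new_all_groups = []
--     for group in all_groups:
--         for index, group_item in enumerate(group):
--             group_item_temp = copy.deepcopy(group_item)
--             group_temp = copy.deepcopy(group)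
--             group_item_temp.append(cur_member)                   # 将取出的待分组人员加入小组
--             group_temp[index] = group_item_temp
--             new_all_groups.append(group_temp)
--     return members_group1(all_employees, new_all_groups)       # 返回所有分组方式
-- ===== SOURCE B (Python) =====
-- def members_group1(all_employees, all_groups):
--     # Iterative rewrite: while-loop over popped members, each level built as a
--     # flat list comprehension using slice concatenation instead of deepcopy.
--     # Like A, it empties all_employees in place via pop(0).
--     while all_employees:
--         cur = all_employees.pop(0)
--         all_groups = [group[:i] + [group[i] + [cur]] + group[i + 1:]
--                       for group in all_groups
--                       for i in range(len(group))]
--     return all_groups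
-- ===== Notes on version B (the rewrite author's own statement) =====
-- stated objective: simpler
-- what changed: Replaced the tail recursion with a while loop and the nested append-into-accumulator loops with a single flat list comprehension that rebuilds each group by slice concatenation (group[:i] + [group[i]+[cur]] + group[i+1:]) instead of two deepcopy calls plus an index assignment.
import Mathlib
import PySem

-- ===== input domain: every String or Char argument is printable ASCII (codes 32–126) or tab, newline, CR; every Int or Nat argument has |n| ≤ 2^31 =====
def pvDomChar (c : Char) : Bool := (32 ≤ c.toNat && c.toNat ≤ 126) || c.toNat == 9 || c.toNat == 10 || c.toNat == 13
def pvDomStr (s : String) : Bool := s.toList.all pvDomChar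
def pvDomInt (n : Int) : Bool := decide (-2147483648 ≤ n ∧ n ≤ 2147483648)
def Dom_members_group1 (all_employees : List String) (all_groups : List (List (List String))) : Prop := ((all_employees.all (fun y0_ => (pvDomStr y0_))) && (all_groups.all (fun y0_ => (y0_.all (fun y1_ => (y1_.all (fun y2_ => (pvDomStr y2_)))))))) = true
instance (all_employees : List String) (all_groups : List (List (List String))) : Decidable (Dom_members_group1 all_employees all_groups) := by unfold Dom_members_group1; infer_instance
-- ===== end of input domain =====

-- B replaces A's tail recursion + deepcopy/index-assignment inner loops with a while loop
-- building each level as one flat slice-concatenation comprehension (objective: simpler).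
-- A empties all_employees in place via pop(0); B does the same; the theorem is about the return value.

-- ===== PORT A =====
-- recursion on all_employees = A's pop(0) + tail call; deepcopy of immutable-by-value lists
-- is the identity here; enumerate(group) is PySem.List.enumerate group (pairs (index, item));
-- group_temp[index] = … is PySem.List.pySetD (index is always in range here).
def members_group1 (all_employees : List String) (all_groups : List (List (List String))) : List (List (List String)) :=
  match all_employees with
  | [] => all_groups
  | cur_member :: rest =>
      members_group1 rest
        (all_groups.foldl (fun new_all_groups group =>
          (PySem.List.enumerate group).foldl (fun acc p =>
            acc ++ [PySem.List.pySetD group p.1 (p.2 ++ [cur_member])]) new_all_groups) [])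

-- ===== PORT B =====
-- while-pop loop = foldl over all_employees; the comprehension = flatMap over groups with a
-- map over range(len(group)); group[:i], group[i], group[i+1:] = take i, getD i [], drop (i+1).
def members_group1_alt (all_employees : List String) (all_groups : List (List (List String))) : List (List (List String)) :=
  all_employees.foldl
    (fun gs cur =>
      gs.flatMap (fun group =>
        (List.range group.length).map (fun i =>
          group.take i ++ [group.getD i [] ++ [cur]] ++ group.drop (i + 1))))
    all_groups

-- ===== PRECONDITION & SPEC =====
def Spec_members_group1 (all_employees : List String) (all_groups : List (List (List String))) (out : List (List (List String))) : Prop := out = members_group1_alt all_employees all_groups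
instance (all_employees : List String) (all_groups : List (List (List String))) (out : List (List (List String))) : Decidable (Spec_members_group1 all_employees all_groups out) := by unfold Spec_members_group1; infer_instance

-- ===== CLAIM (what is proved, stated in full; the proofs are below) =====
def Claim_equal_members_group1 : Prop := ∀ (all_employees : List String) (all_groups : List (List (List String))), Dom_members_group1 all_employees all_groups → Spec_members_group1 all_employees all_groups (members_group1 all_employees all_groups)

-- ===== LEMMAS AND PROOFS =====

-- one level: A's set-at-index view of a group equals B's slice-concatenation view
theorem level_map_eq (cur : String) (group : List (List String)) :
    (PySem.List.enumerate group).map (fun p => PySem.List.pySetD group p.1 (p.2 ++ [cur]))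
      = (List.range group.length).map (fun i =>
          group.take i ++ [group.getD i [] ++ [cur]] ++ group.drop (i + 1)) := by
  rw [PySem.List.enumerate_eq_zipIdx_map, List.map_map]
  apply List.ext_getElem
  · simp
  · intro i h1 h2
    simp only [List.length_map, List.length_zipIdx] at h1
    simp only [List.getElem_map, List.getElem_zipIdx, List.getElem_range, Function.comp,
      Nat.zero_add, Int.zero_add, PySem.List.pySetD_natCast]
    rw [List.set_eq_take_append_cons_drop, if_pos h1, List.getD_eq_getElem _ _ h1]
    simp

-- one level: A's nested append-loops equal B's flatMap
theorem step_eq (cur : String) (gs : List (List (List String))) :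
    gs.foldl (fun new_all_groups group =>
        (PySem.List.enumerate group).foldl (fun acc p =>
          acc ++ [PySem.List.pySetD group p.1 (p.2 ++ [cur])]) new_all_groups) []
      = gs.flatMap (fun group =>
          (List.range group.length).map (fun i =>
            group.take i ++ [group.getD i [] ++ [cur]] ++ group.drop (i + 1))) := by
  have h : ∀ acc : List (List (List String)),
      gs.foldl (fun new_all_groups group =>
        (PySem.List.enumerate group).foldl (fun acc p =>
          acc ++ [PySem.List.pySetD group p.1 (p.2 ++ [cur])]) new_all_groups) acc
      = acc ++ gs.flatMap (fun group =>
          (List.range group.length).map (fun i =>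
            group.take i ++ [group.getD i [] ++ [cur]] ++ group.drop (i + 1))) := by
    intro acc
    calc gs.foldl (fun new_all_groups group =>
            (PySem.List.enumerate group).foldl (fun acc p =>
              acc ++ [PySem.List.pySetD group p.1 (p.2 ++ [cur])]) new_all_groups) acc
        = gs.foldl (fun new_all_groups group =>
            new_all_groups ++ (List.range group.length).map (fun i =>
              group.take i ++ [group.getD i [] ++ [cur]] ++ group.drop (i + 1))) acc := by
          apply PySem.List.foldl_congr_mem
          intro a g _
          rw [PySem.List.foldl_append_singleton_eq_map
                (fun p => PySem.List.pySetD g p.1 (p.2 ++ [cur])) (PySem.List.enumerate g) a,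
              level_map_eq]
      _ = _ := PySem.List.foldl_append_eq_flatMap _ gs acc
  simpa using h []

theorem members_eq (es : List String) :
    ∀ gs, members_group1 es gs = members_group1_alt es gs := by
  induction es with
  | nil => intro gs; rfl
  | cons cur rest ih =>
      intro gs
      simp only [members_group1, members_group1_alt, List.foldl_cons]
      rw [step_eq, ← members_group1_alt]
      exact ih _

-- ===== VERDICT (by name: the statement is the Claim_ definition above) =====
theorem members_group1_spec : Claim_equal_members_group1 := by
  intro es gs _
  exact members_eq es gs
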